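/- GENERATED by c/gen_code.py from vorbis_f.elf: where each function is linked. -/
import X86.Derived.User.State
namespace Vorbis.Code
open X86

def addr__start_vorbis : Word := 0x100000
def addr___asan_report : Word := 0x100059
def addr_range_bad : Word := 0x100200
def addr___asan_load1_noabort : Word := 0x100300
def addr___asan_store1_noabort : Word := 0x1003c0
def addr___asan_load2_noabort : Word := 0x100480
def addr___asan_store2_noabort : Word := 0x100560
def addr___asan_load4_noabort : Word := 0x100640
def addr___asan_store4_noabort : Word := 0x100720
def addr___asan_load8_noabort : Word := 0x100800
def addr___asan_store8_noabort : Word := 0x1008e0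
def addr___asan_load16_noabort : Word := 0x1009c0
def addr___asan_store16_noabort : Word := 0x100a80
def addr___asan_storeN_noabort : Word := 0x100b40
def addr_arena_unpoison : Word := 0x100c00
def addr_arena_poison : Word := 0x100cc0
def addr___asan_register_globals : Word := 0x100d60
def addr_run_ctors : Word := 0x100e60
def addr_swap_bytes : Word := 0x101200
def addr_sift_down : Word := 0x101300
def addr_memcpy : Word := 0x101440
def addr_memset : Word := 0x101520
def addr_memcmp : Word := 0x1015e0
def addr_abs : Word := 0x1016e0
def addr_malloc : Word := 0x101780
def addr_free : Word := 0x101820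
def addr_qsort : Word := 0x1018c0
def addr_two_to : Word := 0x101d00
def addr_pow_int : Word := 0x101da0
def addr_sin_poly : Word := 0x101e60
def addr_cos_poly : Word := 0x102040
def addr_ldexp : Word := 0x102200
def addr_floor : Word := 0x102380
def addr_sincos_quadrant : Word := 0x102440
def addr_exp : Word := 0x1025c0
def addr_log : Word := 0x102920
def addr_pow : Word := 0x102ca0
def addr_sin : Word := 0x102dc0
def addr_cos : Word := 0x102e60
def addr_copy_frame : Word := 0x103200
def addr_put_header : Word := 0x103360
def addr_decode_all : Word := 0x1034a0
def addr__sub_I_65535_1 : Word := 0x1038a0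
def addr_error : Word := 0x103d00
def addr_make_block_array : Word := 0x103dc0
def addr_crc32_init : Word := 0x103ea0
def addr_bit_reverse : Word := 0x103f80
def addr_square : Word := 0x104060
def addr_ilog : Word := 0x104100
def addr_add_entry : Word := 0x104320
def addr_compute_accelerated_huffman : Word := 0x1044a0
def addr_uint32_compare : Word := 0x104740
def addr_include_in_sort : Word := 0x104800
def addr_compute_bitreverse : Word := 0x1048e0
def addr_neighbors : Word := 0x1049e0
def addr_point_compare : Word := 0x104ba0
def addr_get8 : Word := 0x104c60
def addr_get32 : Word := 0x104d40
def addr_skip : Word := 0x104e20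
def addr_capture_pattern : Word := 0x104f00
def addr_imdct_step3_iter0_loop : Word := 0x104fe0
def addr_imdct_step3_inner_r_loop : Word := 0x105740
def addr_imdct_step3_inner_s_loop : Word := 0x105f00
def addr_iter_54 : Word := 0x1066c0
def addr_imdct_step3_inner_s_loop_ld654 : Word := 0x106960
def addr_get_window : Word := 0x106f60
def addr_vorbis_finish_frame : Word := 0x107060
def addr_setup_free : Word := 0x107500
def addr_vorbis_deinit : Word := 0x1075c0
def addr_getn : Word := 0x107f00
def addr_vorbis_init : Word := 0x108000
def addr_compute_codewords : Word := 0x1081a0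
def addr_predict_point : Word := 0x108640
def addr_draw_line : Word := 0x108720
def addr_do_floor : Word := 0x1089c0
def addr_setup_temp_malloc : Word := 0x108dc0
def addr_setup_malloc : Word := 0x108f20
def addr_vorbis_alloc : Word := 0x109080
def addr_arena_temp_restore : Word := 0x109120
def addr_inverse_mdct : Word := 0x109220
def addr_setup_temp_free : Word := 0x10b100
def addr_compute_sorted_huffman : Word := 0x10b1e0
def addr_vorbis_validate : Word := 0x10b8e0
def addr_float32_unpack : Word := 0x10b980
def addr_lookup1_values : Word := 0x10ba60
def addr_compute_twiddle_factors : Word := 0x10bc40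
def addr_compute_window : Word := 0x10c080
def addr_init_blocksize : Word := 0x10c1a0
def addr_stb_vorbis_close : Word := 0x10c560
def addr_stb_vorbis_get_error : Word := 0x10c600
def addr_stb_vorbis_get_file_offset : Word := 0x10c6c0
def addr_start_page_no_capturepattern : Word := 0x10c780
def addr_start_page : Word := 0x10cbc0
def addr_next_segment : Word := 0x10cc80
def addr_get8_packet_raw : Word := 0x10cf40
def addr_get8_packet : Word := 0x10d040
def addr_get32_packet : Word := 0x10d100
def addr_get_bits : Word := 0x10d1c0
def addr_prep_huffman : Word := 0x10d440
def addr_codebook_decode_scalar_raw : Word := 0x10d5c0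
def addr_codebook_decode_deinterleave_repeat : Word := 0x10dbc0
def addr_codebook_decode_start : Word := 0x10e320
def addr_codebook_decode_step : Word := 0x10e5c0
def addr_codebook_decode : Word := 0x10e7a0
def addr_residue_decode : Word := 0x10ea60
def addr_decode_residue : Word := 0x10ec00
def addr_flush_packet : Word := 0x110a60
def addr_vorbis_decode_packet_rest : Word := 0x110b00
def addr_start_packet : Word := 0x112da0
def addr_maybe_start_packet : Word := 0x112f00
def addr_vorbis_decode_initial : Word := 0x113160
def addr_vorbis_decode_packet : Word := 0x113660
def addr_vorbis_pump_first_frame : Word := 0x113840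
def addr_start_decoder : Word := 0x113980
def addr_stb_vorbis_get_frame_float : Word := 0x1196c0
def addr_stb_vorbis_open_memory : Word := 0x119a40

/-- Every function: name, address, size in bytes. -/
def functions : List (String × Word × Nat) :=
  [ ("_start_vorbis", 0x100000, 89)
  , ("__asan_report", 0x100059, 64)
  , ("range_bad", 0x100200, 105)
  , ("__asan_load1_noabort", 0x100300, 56)
  , ("__asan_store1_noabort", 0x1003c0, 56)
  , ("__asan_load2_noabort", 0x100480, 79)
  , ("__asan_store2_noabort", 0x100560, 79)
  , ("__asan_load4_noabort", 0x100640, 79)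
  , ("__asan_store4_noabort", 0x100720, 79)
  , ("__asan_load8_noabort", 0x100800, 79)
  , ("__asan_store8_noabort", 0x1008e0, 79)
  , ("__asan_load16_noabort", 0x1009c0, 38)
  , ("__asan_store16_noabort", 0x100a80, 38)
  , ("__asan_storeN_noabort", 0x100b40, 50)
  , ("arena_unpoison", 0x100c00, 40)
  , ("arena_poison", 0x100cc0, 27)
  , ("__asan_register_globals", 0x100d60, 97)
  , ("run_ctors", 0x100e60, 25)
  , ("swap_bytes", 0x101200, 102)
  , ("sift_down", 0x101300, 156)
  , ("memcpy", 0x101440, 91)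
  , ("memset", 0x101520, 61)
  , ("memcmp", 0x1015e0, 109)
  , ("abs", 0x1016e0, 11)
  , ("malloc", 0x101780, 6)
  , ("free", 0x101820, 1)
  , ("qsort", 0x1018c0, 131)
  , ("two_to", 0x101d00, 16)
  , ("pow_int", 0x101da0, 37)
  , ("sin_poly", 0x101e60, 225)
  , ("cos_poly", 0x102040, 221)
  , ("ldexp", 0x102200, 186)
  , ("floor", 0x102380, 62)
  , ("sincos_quadrant", 0x102440, 190)
  , ("exp", 0x1025c0, 420)
  , ("log", 0x102920, 443)
  , ("pow", 0x102ca0, 136)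
  , ("sin", 0x102dc0, 11)
  , ("cos", 0x102e60, 11)
  , ("copy_frame", 0x103200, 172)
  , ("put_header", 0x103360, 155)
  , ("decode_all", 0x1034a0, 497)
  , ("_sub_I_65535_1", 0x1038a0, 24)
  , ("error", 0x103d00, 41)
  , ("make_block_array", 0x103dc0, 89)
  , ("crc32_init", 0x103ea0, 92)
  , ("bit_reverse", 0x103f80, 86)
  , ("square", 0x104060, 5)
  , ("ilog", 0x104100, 270)
  , ("add_entry", 0x104320, 189)
  , ("compute_accelerated_huffman", 0x1044a0, 321)
  , ("uint32_compare", 0x104740, 56)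
  , ("include_in_sort", 0x104800, 71)
  , ("compute_bitreverse", 0x1048e0, 106)
  , ("neighbors", 0x1049e0, 220)
  , ("point_compare", 0x104ba0, 60)
  , ("get8", 0x104c60, 93)
  , ("get32", 0x104d40, 65)
  , ("skip", 0x104e20, 105)
  , ("capture_pattern", 0x104f00, 84)
  , ("imdct_step3_iter0_loop", 0x104fe0, 934)
  , ("imdct_step3_inner_r_loop", 0x105740, 977)
  , ("imdct_step3_inner_s_loop", 0x105f00, 980)
  , ("iter_54", 0x1066c0, 321)
  , ("imdct_step3_inner_s_loop_ld654", 0x106960, 767)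
  , ("get_window", 0x106f60, 106)
  , ("vorbis_finish_frame", 0x107060, 582)
  , ("setup_free", 0x107500, 45)
  , ("vorbis_deinit", 0x1075c0, 1181)
  , ("getn", 0x107f00, 123)
  , ("vorbis_init", 0x108000, 207)
  , ("compute_codewords", 0x1081a0, 587)
  , ("predict_point", 0x108640, 66)
  , ("draw_line", 0x108720, 325)
  , ("do_floor", 0x1089c0, 507)
  , ("setup_temp_malloc", 0x108dc0, 246)
  , ("setup_malloc", 0x108f20, 253)
  , ("vorbis_alloc", 0x109080, 19)
  , ("arena_temp_restore", 0x109120, 99)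
  , ("inverse_mdct", 0x109220, 3951)
  , ("setup_temp_free", 0x10b100, 86)
  , ("compute_sorted_huffman", 0x10b1e0, 896)
  , ("vorbis_validate", 0x10b8e0, 32)
  , ("float32_unpack", 0x10b980, 88)
  , ("lookup1_values", 0x10ba60, 278)
  , ("compute_twiddle_factors", 0x10bc40, 543)
  , ("compute_window", 0x10c080, 144)
  , ("init_blocksize", 0x10c1a0, 466)
  , ("stb_vorbis_close", 0x10c560, 28)
  , ("stb_vorbis_get_error", 0x10c600, 34)
  , ("stb_vorbis_get_file_offset", 0x10c6c0, 43)
  , ("start_page_no_capturepattern", 0x10c780, 540)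
  , ("start_page", 0x10cbc0, 38)
  , ("next_segment", 0x10cc80, 339)
  , ("get8_packet_raw", 0x10cf40, 128)
  , ("get8_packet", 0x10d040, 47)
  , ("get32_packet", 0x10d100, 62)
  , ("get_bits", 0x10d1c0, 310)
  , ("prep_huffman", 0x10d440, 187)
  , ("codebook_decode_scalar_raw", 0x10d5c0, 803)
  , ("codebook_decode_deinterleave_repeat", 0x10dbc0, 947)
  , ("codebook_decode_start", 0x10e320, 334)
  , ("codebook_decode_step", 0x10e5c0, 236)
  , ("codebook_decode", 0x10e7a0, 347)
  , ("residue_decode", 0x10ea60, 199)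
  , ("decode_residue", 0x10ec00, 3884)
  , ("flush_packet", 0x110a60, 19)
  , ("vorbis_decode_packet_rest", 0x110b00, 4431)
  , ("start_packet", 0x112da0, 165)
  , ("maybe_start_packet", 0x112f00, 295)
  , ("vorbis_decode_initial", 0x113160, 634)
  , ("vorbis_decode_packet", 0x113660, 235)
  , ("vorbis_pump_first_frame", 0x113840, 154)
  , ("start_decoder", 0x113980, 12029)
  , ("stb_vorbis_get_frame_float", 0x1196c0, 437)
  , ("stb_vorbis_open_memory", 0x119a40, 427) ]

end Vorbis.Code
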